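-- pv_equiv track=rewrite | github.com/iftahro/python-for-engineers | ex3/ex3.py | mult_odd_digits
-- ===== SOURCE A (Python) =====
-- def mult_odd_digits(n):
--     result = 1
--     while n > 0:
--         num = n % 10
--         if num % 2 == 1:
--             result *= num
--         n //= 10
--     return result
-- ===== SOURCE B (Python) =====
-- def mult_odd_digits(n):
--     result = 1
--     if n > 0:
--         for c in str(n):
--             d = ord(c) - ord('0')
--             if d % 2 == 1:
--                 result *= d
--     return result
-- ===== Notes on version B (the rewrite author's own statement) =====
-- stated objective: idiomatic
-- what changed: Replaces the destructive while-loop that peels digits off with modulo and floor-division by a single pass over the characters of the decimal string str(n), converting each character to a digit and multiplying the odd ones.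
import Mathlib
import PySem

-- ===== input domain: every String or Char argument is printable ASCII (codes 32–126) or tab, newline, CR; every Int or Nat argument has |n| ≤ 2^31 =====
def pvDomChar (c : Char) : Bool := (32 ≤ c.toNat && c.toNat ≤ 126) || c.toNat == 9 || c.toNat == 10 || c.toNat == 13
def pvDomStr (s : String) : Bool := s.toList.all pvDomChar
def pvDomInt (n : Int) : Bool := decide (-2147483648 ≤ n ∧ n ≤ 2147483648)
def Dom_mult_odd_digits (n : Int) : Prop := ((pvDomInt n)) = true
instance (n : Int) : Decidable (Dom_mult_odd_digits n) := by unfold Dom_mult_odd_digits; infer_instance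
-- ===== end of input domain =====

-- B replaces A's destructive %10 / //=10 while-loop by a single pass over the characters of str(n) (idiomatic, same cost).

-- ===== PORT A =====
-- the while-loop of A: state (n, result)
def multOddLoopA (n : Int) (result : Int) : Int :=
  if _h : n > 0 then
    let num := PySem.Int.mod n 10
    multOddLoopA (PySem.Int.floordiv n 10)
      (if PySem.Int.mod num 2 = 1 then result * num else result)
  else result
termination_by n.toNat
decreasing_by
  have h10 : PySem.Int.floordiv n 10 = n / 10 := PySem.Int.floordiv_eq_ediv_of_pos (by omega)
  rw [h10]; omega

def mult_odd_digits (n : Int) : Int := multOddLoopA n 1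

-- ===== PORT B =====
-- B's loop body: d = ord(c) - ord('0'); if d % 2 == 1: result *= d
def multOddStepB (result : Int) (c : Char) : Int :=
  let d : Int := (c.toNat : Int) - 48
  if PySem.Int.mod d 2 = 1 then result * d else result

def mult_odd_digits_alt (n : Int) : Int :=
  if n > 0 then (PySem.Int.toStr n).toList.foldl multOddStepB 1 else 1

-- ===== PRECONDITION & SPEC =====
def Spec_mult_odd_digits (n : Int) (out : Int) : Prop := out = mult_odd_digits_alt n
instance (n : Int) (out : Int) : Decidable (Spec_mult_odd_digits n out) := by unfold Spec_mult_odd_digits; infer_instance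

-- ===== CLAIM (what is proved, stated in full; the proofs are below) =====
def Claim_equal_mult_odd_digits : Prop := ∀ (n : Int), Dom_mult_odd_digits n → Spec_mult_odd_digits n (mult_odd_digits n)

-- ===== LEMMAS AND PROOFS =====

-- the common value: product of the odd decimal digits of m (as Int)
def oddProdI (m : Nat) : Int :=
  (((Nat.digits 10 m).map (Nat.cast : Nat → Int)).filter (fun d => PySem.Int.mod d 2 = 1)).prod

-- peeling the last decimal digit off oddProdI
lemma oddProdI_rec (m : Nat) (hm : 0 < m) :
    oddProdI m = (if PySem.Int.mod ((m % 10 : Nat) : Int) 2 = 1 then ((m % 10 : Nat) : Int) else 1)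
      * oddProdI (m / 10) := by
  rw [oddProdI, Nat.digits_def' (by norm_num : 1 < 10) hm]
  rw [List.map_cons, List.filter_cons]
  by_cases h : PySem.Int.mod ((m % 10 : Nat) : Int) 2 = 1
  · rw [if_pos (decide_eq_true_iff.mpr h), if_pos h, List.prod_cons, oddProdI]
  · rw [if_neg (fun hc => h (decide_eq_true_iff.mp hc)), if_neg h, oddProdI, one_mul]

-- folding the if-odd-multiply step over a digit list is multiplying by the odd-filtered product
lemma foldl_oddstep_nat (l : List Nat) (r : Int) :
    l.foldl (fun (a : Int) (d : Nat) =>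
        if PySem.Int.mod (d : Int) 2 = 1 then a * (d : Int) else a) r
      = r * ((l.map (Nat.cast : Nat → Int)).filter (fun d => PySem.Int.mod d 2 = 1)).prod := by
  induction l generalizing r with
  | nil => simp
  | cons d l ih =>
    rw [List.foldl_cons, ih, List.map_cons, List.filter_cons]
    by_cases h : PySem.Int.mod (d : Int) 2 = 1
    · rw [if_pos (decide_eq_true_iff.mpr h), if_pos h, List.prod_cons]; ring
    · rw [if_neg (fun hc => h (decide_eq_true_iff.mp hc)), if_neg h]

-- A's loop computes r times the odd-digit product of n.toNat
lemma multOddLoopA_eq (m : Nat) (r : Int) : multOddLoopA (m : Int) r = r * oddProdI m := by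
  induction m using Nat.strong_induction_on generalizing r with
  | _ m ih =>
    rw [multOddLoopA]
    by_cases hm : (m : Int) > 0
    · have hmpos : 0 < m := by exact_mod_cast hm
      simp only [hm, dif_pos]
      have hmod : PySem.Int.mod (m : Int) 10 = ((m % 10 : Nat) : Int) := by
        exact_mod_cast PySem.Int.mod_natCast m 10
      have hdiv : PySem.Int.floordiv (m : Int) 10 = ((m / 10 : Nat) : Int) := by
        exact_mod_cast PySem.Int.floordiv_natCast m 10
      rw [hmod, hdiv, ih (m / 10) (Nat.div_lt_self hmpos (by norm_num)), oddProdI_rec m hmpos]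
      by_cases h : PySem.Int.mod ((m % 10 : Nat) : Int) 2 = 1 <;>
        simp only [h, if_true, if_false] <;> ring
    · have hm0 : m = 0 := by omega
      simp [hm0, oddProdI]

-- Nat.toDigits is the reversed digitChar image of Nat.digits (for positive m)
lemma toDigitsCore_eq (f : Nat) : ∀ (m : Nat), 0 < m → m < f → ∀ (ds : List Char),
    Nat.toDigitsCore 10 f m ds = ((Nat.digits 10 m).map Nat.digitChar).reverse ++ ds := by
  induction f with
  | zero => intro m _ h; omega
  | succ f ih =>
    intro m hm hf ds
    rw [Nat.digits_def' (by norm_num : 1 < 10) hm]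
    by_cases h0 : m / 10 = 0
    · rw [Nat.toDigitsCore]
      simp [h0]
    · have hlt : m / 10 < f := by
        have := Nat.div_lt_self hm (by norm_num : 1 < 10); omega
      have hstep : Nat.toDigitsCore 10 (f + 1) m ds
          = Nat.toDigitsCore 10 f (m / 10) ((m % 10).digitChar :: ds) := by
        rw [Nat.toDigitsCore]; simp [h0]
      rw [hstep, ih (m / 10) (Nat.pos_of_ne_zero h0) hlt]
      simp

lemma toDigits_eq (m : Nat) (hm : 0 < m) :
    Nat.toDigits 10 m = ((Nat.digits 10 m).map Nat.digitChar).reverse := by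
  rw [Nat.toDigits, toDigitsCore_eq (m + 1) m hm (by omega), List.append_nil]

-- digitChar undoes to the digit for d < 10
lemma digitChar_toNat (d : Nat) (hd : d < 10) : ((Nat.digitChar d).toNat : Int) - 48 = d := by
  interval_cases d <;> decide

-- B's fold over str(n) equals the odd-digit product, for positive n
lemma foldB_eq (m : Nat) (hm : 0 < m) :
    (Nat.toDigits 10 m).foldl multOddStepB 1 = oddProdI m := by
  rw [toDigits_eq m hm]
  have hlt : ∀ d ∈ (Nat.digits 10 m).reverse, d < 10 := by
    intro d hd
    exact Nat.digits_lt_base (by norm_num) (List.mem_reverse.mp hd)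
  rw [← List.map_reverse, List.foldl_map]
  have hcongr : (Nat.digits 10 m).reverse.foldl (fun a d => multOddStepB a (Nat.digitChar d)) 1
      = (Nat.digits 10 m).reverse.foldl
          (fun (a : Int) (d : Nat) => if PySem.Int.mod (d : Int) 2 = 1 then a * (d : Int) else a)
          1 := by
    apply PySem.List.foldl_congr_mem
    intro a d hd
    simp only [multOddStepB, digitChar_toNat d (hlt d hd)]
  rw [hcongr, foldl_oddstep_nat, one_mul, oddProdI,
    List.map_reverse, List.filter_reverse, List.prod_reverse]

-- ===== VERDICT (by name: the statement is the Claim_ definition above) =====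
theorem mult_odd_digits_spec : Claim_equal_mult_odd_digits := by
  intro n _
  unfold Spec_mult_odd_digits mult_odd_digits mult_odd_digits_alt
  by_cases hn : n > 0
  · have hmpos : 0 < n.toNat := by omega
    have hn' : n = (n.toNat : Int) := (Int.toNat_of_nonneg (by omega)).symm
    rw [if_pos hn, hn', multOddLoopA_eq n.toNat 1, one_mul]
    have hnn : ¬ ((n.toNat : Int) < 0) := by omega
    have hchars : PySem.Int.toChars ((n.toNat : Int)) = Nat.toDigits 10 n.toNat := by
      rw [PySem.Int.toChars, if_neg hnn, Int.toNat_natCast]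
    rw [PySem.Int.toList_toStr, hchars, foldB_eq n.toNat hmpos]
  · rw [if_neg hn, multOddLoopA, dif_neg hn]
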